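-- pv_equiv track=rewrite | github.com/xiaoqingyu0113/mcf4pingpong | tests/yolo_tests/test_yolo_detection.py | separate_image_with_camera
-- ===== SOURCE A (Python) =====
-- def separate_image_with_camera(jpg_files):
--     cam1_jpg, cam2_jpg, cam3_jpg = [], [], []
--     for jpg in jpg_files:
--         if 'cam1' in jpg:
--             cam1_jpg.append(jpg)
--         elif 'cam2' in jpg:
--             cam2_jpg.append(jpg)
--         elif 'cam3' in jpg:
--             cam3_jpg.append(jpg)
--     cam1_jpg.sort()
--     cam2_jpg.sort()
--     cam3_jpg.sort()
--     return cam1_jpg, cam2_jpg, cam3_jpg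
-- ===== SOURCE B (Python) =====
-- def separate_image_with_camera(jpg_files):
--     ordered = sorted(jpg_files)
--     cam1_jpg = [j for j in ordered if 'cam1' in j]
--     cam2_jpg = [j for j in ordered if 'cam1' not in j and 'cam2' in j]
--     cam3_jpg = [j for j in ordered if 'cam1' not in j and 'cam2' not in j and 'cam3' in j]
--     return cam1_jpg, cam2_jpg, cam3_jpg
-- ===== Notes on version B (the rewrite author's own statement) =====
-- stated objective: alternative
-- what changed: B sorts the whole list once up front and then extracts each camera bucket with a filtering comprehension (keeping the cam1/cam2/cam3 priority), instead of A's single accumulating loop followed by three per-bucket sorts; each bucket is a subsequence of the sorted list, so no further sorting is needed.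
import Mathlib
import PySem

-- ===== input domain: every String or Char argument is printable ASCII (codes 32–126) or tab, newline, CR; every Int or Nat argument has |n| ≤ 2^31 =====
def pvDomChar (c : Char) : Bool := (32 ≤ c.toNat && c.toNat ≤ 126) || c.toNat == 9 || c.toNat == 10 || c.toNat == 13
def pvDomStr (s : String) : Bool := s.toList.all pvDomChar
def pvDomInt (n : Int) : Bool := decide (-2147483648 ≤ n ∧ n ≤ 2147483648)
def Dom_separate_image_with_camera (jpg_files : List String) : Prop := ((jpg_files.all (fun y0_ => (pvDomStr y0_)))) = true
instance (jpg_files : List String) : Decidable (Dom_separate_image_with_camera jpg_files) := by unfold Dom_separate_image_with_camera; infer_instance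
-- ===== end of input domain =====

-- B sorts the whole input once and then pulls each camera bucket out with a filtering
-- comprehension (same cam1/cam2/cam3 priority), instead of A's accumulating loop plus
-- three per-bucket sorts; objective: alternative decomposition, same asymptotic cost.

-- ===== PORT A =====
def separate_image_with_camera (jpg_files : List String) : List String × List String × List String :=
  let r := jpg_files.foldl (fun (acc : List String × List String × List String) jpg =>
    if PySem.Str.isIn "cam1" jpg then (acc.1 ++ [jpg], acc.2.1, acc.2.2)
    else if PySem.Str.isIn "cam2" jpg then (acc.1, acc.2.1 ++ [jpg], acc.2.2)
    else if PySem.Str.isIn "cam3" jpg then (acc.1, acc.2.1, acc.2.2 ++ [jpg])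
    else acc) ([], [], [])
  (PySem.List.sorted r.1 (fun x => x) false,
   PySem.List.sorted r.2.1 (fun x => x) false,
   PySem.List.sorted r.2.2 (fun x => x) false)

-- ===== PORT B =====
def separate_image_with_camera_alt (jpg_files : List String) : List String × List String × List String :=
  let ordered := PySem.List.sorted jpg_files (fun x => x) false
  (ordered.filter (fun j => PySem.Str.isIn "cam1" j),
   ordered.filter (fun j => !PySem.Str.isIn "cam1" j && PySem.Str.isIn "cam2" j),
   ordered.filter (fun j => !PySem.Str.isIn "cam1" j && !PySem.Str.isIn "cam2" j && PySem.Str.isIn "cam3" j))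

-- ===== PRECONDITION & SPEC =====
def Spec_separate_image_with_camera (jpg_files : List String) (out : List String × List String × List String) : Prop := out = separate_image_with_camera_alt jpg_files
instance (jpg_files : List String) (out : List String × List String × List String) : Decidable (Spec_separate_image_with_camera jpg_files out) := by unfold Spec_separate_image_with_camera; infer_instance

-- ===== CLAIM (what is proved, stated in full; the proofs are below) =====
def Claim_equal_separate_image_with_camera : Prop := ∀ (jpg_files : List String), Dom_separate_image_with_camera jpg_files → Spec_separate_image_with_camera jpg_files (separate_image_with_camera jpg_files)

-- ===== LEMMAS AND PROOFS =====

-- A's accumulating loop computes the three priority-filtered sublists (appended to the accumulators).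
theorem pv_loopA (p1 p2 p3 : String → Bool) (xs : List String) (a b c : List String) :
    xs.foldl (fun (acc : List String × List String × List String) jpg =>
      if p1 jpg then (acc.1 ++ [jpg], acc.2.1, acc.2.2)
      else if p2 jpg then (acc.1, acc.2.1 ++ [jpg], acc.2.2)
      else if p3 jpg then (acc.1, acc.2.1, acc.2.2 ++ [jpg])
      else acc) (a, b, c)
    = (a ++ xs.filter (fun j => p1 j),
       b ++ xs.filter (fun j => !p1 j && p2 j),
       c ++ xs.filter (fun j => !p1 j && !p2 j && p3 j)) := by
  induction xs generalizing a b c with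
  | nil => simp
  | cons x xs ih =>
    simp only [List.foldl_cons, List.filter_cons]
    by_cases h1 : p1 x
    · simp [h1, ih]
    · by_cases h2 : p2 x
      · simp [h1, h2, ih]
      · by_cases h3 : p3 x
        · simp [h1, h2, h3, ih]
        · simp [h1, h2, h3, ih]

-- sorting a filtered list = filtering the sorted list (identity key).
theorem pv_sorted_filter (xs : List String) (p : String → Bool) :
    PySem.List.sorted (xs.filter p) (fun x => x) false
      = (PySem.List.sorted xs (fun x => x) false).filter p := by
  refine PySem.List.sorted_id_eq_of_perm_of_pairwise _ _ ?_ ?_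
  · exact (PySem.List.sorted_perm xs (fun x => x) false).filter p
  · exact (PySem.List.sorted_pairwise xs (fun x => x)).filter p

-- ===== VERDICT (by name: the statement is the Claim_ definition above) =====
theorem separate_image_with_camera_spec : Claim_equal_separate_image_with_camera := by
  intro jpg_files _
  unfold Spec_separate_image_with_camera separate_image_with_camera separate_image_with_camera_alt
  rw [pv_loopA]
  simp only [List.nil_append]
  exact congrArg₂ Prod.mk (pv_sorted_filter ..) (congrArg₂ Prod.mk (pv_sorted_filter ..) (pv_sorted_filter ..))
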